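-- pv_equiv track=rewrite | github.com/viococo/adventOfCode | 2021/day3/main.py | getArrByBit
-- ===== SOURCE A (Python) =====
-- def getArrByBit(arr):
--   arrToUse = []
--   for binary in arr:
--     for depth, number in enumerate(binary):
--       if len(arrToUse) <= depth:
--         arrToUse.append([])
--       arrToUse[depth].append(number)
--   arrToUse = arrToUse[:-1]
--   return arrToUse
-- ===== SOURCE B (Python) =====
-- def getArrByBit(arr):
--   m = max((len(b) for b in arr), default=0)
--   cols = [[b[depth] for b in arr if depth < len(b)] for depth in range(m)]
--   return cols[:-1]
-- ===== Notes on version B (the rewrite author's own statement) =====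
-- stated objective: alternative
-- what changed: B transposes column-major: it computes the maximum string length once, then builds each bit-column directly with one comprehension per depth, instead of A's row-major loop that grows and mutates a list of columns element by element.
import Mathlib
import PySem

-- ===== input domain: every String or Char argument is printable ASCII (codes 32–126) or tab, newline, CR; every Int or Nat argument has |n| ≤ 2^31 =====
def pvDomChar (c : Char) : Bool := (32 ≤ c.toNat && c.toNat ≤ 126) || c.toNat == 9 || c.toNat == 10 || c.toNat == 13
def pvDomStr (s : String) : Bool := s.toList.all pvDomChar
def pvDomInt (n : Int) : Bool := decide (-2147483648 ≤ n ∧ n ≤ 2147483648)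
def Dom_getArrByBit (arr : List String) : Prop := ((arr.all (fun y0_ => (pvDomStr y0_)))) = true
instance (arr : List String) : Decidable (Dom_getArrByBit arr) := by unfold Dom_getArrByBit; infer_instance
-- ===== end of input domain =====

-- B re-implements the transpose column-major (max length once, then one pass per depth) instead of
-- A's row-major loop that grows and mutates a list of columns; alternative decomposition, same return value.

-- ===== PORT A =====
-- body of A's inner loop: 'if len(arrToUse) <= depth: arrToUse.append([])' then 'arrToUse[depth].append(number)'
def pvF (acc : List (List String)) (p : Int × Char) : List (List String) :=
  let acc1 := if (acc.length : Int) ≤ p.1 then acc ++ [([] : List String)] else acc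
  PySem.List.pySetD acc1 p.1 (PySem.List.pyGetD acc1 p.1 [] ++ [String.singleton p.2])

-- 'for depth, number in enumerate(binary): …'
def pvInner (acc : List (List String)) (binary : String) : List (List String) :=
  (PySem.List.enumerate binary.toList 0).foldl pvF acc

def getArrByBit (arr : List String) : List (List String) :=
  PySem.List.slice (arr.foldl pvInner []) none (some (-1))

-- ===== PORT B =====
-- '[b[depth] for b in arr if depth < len(b)]'
def pvCol (arr : List String) (depth : Int) : List String :=
  arr.filterMap (fun b =>
    if depth < PySem.Str.len b then some (String.singleton (PySem.List.pyGetD b.toList depth ' ')) else none)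

def getArrByBit_alt (arr : List String) : List (List String) :=
  let m : Int := (PySem.List.max? (arr.map PySem.Str.len) (fun y => y)).getD 0
  PySem.List.slice ((PySem.List.pyRange 0 m 1).map (pvCol arr)) none (some (-1))

-- ===== PRECONDITION & SPEC =====
def Spec_getArrByBit (arr : List String) (out : List (List String)) : Prop := out = getArrByBit_alt arr
instance (arr : List String) (out : List (List String)) : Decidable (Spec_getArrByBit arr out) := by unfold Spec_getArrByBit; infer_instance

-- ===== CLAIM (what is proved, stated in full; the proofs are below) =====
def Claim_equal_getArrByBit : Prop := ∀ (arr : List String), Dom_getArrByBit arr → Spec_getArrByBit arr (getArrByBit arr)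

-- ===== LEMMAS AND PROOFS =====

-- maximum string length in the list (Nat form, used to characterise both sides)
def pvMaxD (l : List String) : Nat := l.foldr (fun b m => max b.toList.length m) 0

-- Nat-index form of a column
def pvColN (arr : List String) (d : Nat) : List String :=
  arr.filterMap (fun b =>
    if d < b.toList.length then some (String.singleton (b.toList.getD d ' ')) else none)

lemma pvF_length (acc : List (List String)) (k : Nat) (c : Char) (hk : k ≤ acc.length) :
    (pvF acc ((k : Int), c)).length = max acc.length (k + 1) := by
  simp only [pvF, PySem.List.pySetD_natCast]
  by_cases hl : acc.length ≤ k
  · rw [if_pos (by exact_mod_cast hl)]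
    simp
    omega
  · rw [if_neg (by exact_mod_cast hl)]
    simp
    omega

lemma pvF_getD (acc : List (List String)) (k : Nat) (c : Char) (hk : k ≤ acc.length) (d : Nat) :
    (pvF acc ((k : Int), c)).getD d [] =
      if d = k then acc.getD k [] ++ [String.singleton c] else acc.getD d [] := by
  simp only [pvF, PySem.List.pySetD_natCast, PySem.List.pyGetD_natCast]
  by_cases hl : acc.length ≤ k
  · have hk' : acc.length = k := le_antisymm hl hk
    rw [if_pos (by exact_mod_cast hl)]
    have hgk : (acc ++ [([] : List String)]).getD k [] = [] := by
      simp [List.getD_eq_getElem?_getD, hk']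
    rw [hgk]
    have hak : acc.getD k [] = [] := by
      simp [List.getD_eq_getElem?_getD, List.getElem?_eq_none (by omega : acc.length ≤ k)]
    by_cases hd : d = k
    · subst hd
      simp [List.getD_eq_getElem?_getD, List.getElem?_set, hk']
    · rw [if_neg hd]
      simp only [List.getD_eq_getElem?_getD, List.getElem?_set]
      rw [if_neg (by omega)]
      by_cases hdl : d < acc.length
      · rw [List.getElem?_append_left hdl]
      · rw [List.getElem?_eq_none (by omega : acc.length ≤ d),
          List.getElem?_eq_none (by simp; omega)]
  · rw [if_neg (by exact_mod_cast hl)]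
    by_cases hd : d = k
    · subst hd
      simp [List.getD_eq_getElem?_getD, List.getElem?_set, (by omega : d < acc.length)]
    · simp [List.getD_eq_getElem?_getD, List.getElem?_set, hd, Ne.symm hd]

lemma inner_char (cs : List Char) : ∀ (k : Nat) (acc : List (List String)), k ≤ acc.length →
    (PySem.List.enumerate cs (k : Int)).foldl pvF acc
      = (List.range (max acc.length (k + cs.length))).map
          (fun d => acc.getD d [] ++
            (if k ≤ d ∧ d < k + cs.length then [String.singleton (cs.getD (d - k) ' ')] else [])) := by
  induction cs with
  | nil =>
    intro k acc hk
    rw [PySem.List.enumerate_nil, List.foldl_nil]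
    simp only [List.length_nil, Nat.add_zero]
    apply List.ext_getElem
    · simp
      omega
    · intro i h1 h2
      simp only [List.length_map, List.length_range] at h2
      simp only [List.getElem_map, List.getElem_range]
      rw [if_neg (by omega)]
      simp [List.getD_eq_getElem?_getD, List.getElem?_eq_getElem h1]
  | cons c cs ih =>
    intro k acc hk
    rw [PySem.List.enumerate_cons, List.foldl_cons]
    rw [show (k : Int) + 1 = ((k + 1 : Nat) : Int) by push_cast; ring]
    rw [ih (k + 1) (pvF acc ((k : Int), c)) (by rw [pvF_length acc k c hk]; omega)]
    apply List.ext_getElem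
    · simp [pvF_length acc k c hk]
      omega
    · intro i h1 h2
      simp only [List.length_map, List.length_range] at h1 h2
      simp only [List.getElem_map, List.getElem_range]
      rw [pvF_getD acc k c hk i]
      by_cases hik : i = k
      · subst hik
        rw [if_pos rfl, if_neg (by omega), if_pos (by simp)]
        simp
      · rw [if_neg hik]
        by_cases hcond : k ≤ i ∧ i < k + (cs.length + 1)
        · by_cases hc1 : i < k + 1
          · exact absurd (by omega : i = k) hik
          · rw [if_pos (by omega), if_pos (by simpa using hcond)]
            have : i - k = (i - (k + 1)) + 1 := by omega
            rw [this]
            simp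
        · rw [if_neg (by omega), if_neg (by simpa using hcond)]

lemma step_eq (acc : List (List String)) (s : String) :
    pvInner acc s
      = (List.range (max acc.length s.toList.length)).map
          (fun d => acc.getD d [] ++
            (if d < s.toList.length then [String.singleton (s.toList.getD d ' ')] else [])) := by
  unfold pvInner
  rw [show (0 : Int) = ((0 : Nat) : Int) by simp]
  rw [inner_char s.toList 0 acc (Nat.zero_le _)]
  simp only [Nat.zero_add, Nat.zero_le, true_and, Nat.sub_zero]

lemma outer (l : List String) : ∀ acc : List (List String),
    l.foldl pvInner acc
      = (List.range (max acc.length (pvMaxD l))).map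
          (fun d => acc.getD d [] ++ pvColN l d) := by
  induction l with
  | nil =>
    intro acc
    rw [List.foldl_nil]
    apply List.ext_getElem
    · simp [pvMaxD]
    · intro i h1 h2
      simp only [List.length_map, List.length_range] at h2
      simp only [List.getElem_map, List.getElem_range]
      simp [pvColN, List.getD_eq_getElem?_getD, List.getElem?_eq_getElem h1]
  | cons s l ih =>
    intro acc
    rw [List.foldl_cons, ih (pvInner acc s), step_eq acc s]
    apply List.ext_getElem
    · simp [pvMaxD]
    · intro i h1 h2
      simp only [List.length_map, List.length_range] at h1 h2
      simp only [List.getElem_map, List.getElem_range]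
      by_cases him : i < max acc.length s.toList.length
      · rw [PySem.List.getD_map_range _ _ _ _ him]
        by_cases hs : i < s.toList.length
        · have hs' : i < s.length := by rwa [String.length_toList] at hs
          simp [pvColN, List.filterMap_cons, hs', List.append_assoc]
        · have hs' : ¬ i < s.length := by rwa [String.length_toList] at hs
          simp [pvColN, List.filterMap_cons, hs']
      · have hga : acc.getD i [] = [] := by
          rw [List.getD_eq_getElem?_getD, List.getElem?_eq_none (by omega : acc.length ≤ i)]
          rfl
        have hgm : (List.map (fun d => acc.getD d [] ++
              (if d < s.toList.length then [String.singleton (s.toList.getD d ' ')] else []))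
              (List.range (max acc.length s.toList.length))).getD i [] = [] := by
          rw [List.getD_eq_getElem?_getD,
            List.getElem?_eq_none (by simp only [List.length_map, List.length_range]; omega)]
          rfl
        rw [hgm, hga]
        have hs' : ¬ i < s.length := by rw [← String.length_toList]; omega
        simp [pvColN, List.filterMap_cons, hs']

lemma foldl_max_len (l : List String) : ∀ m : Nat,
    (l.map PySem.Str.len).foldl max (m : Int) = ((max m (pvMaxD l) : Nat) : Int) := by
  induction l with
  | nil => intro m; simp [pvMaxD]
  | cons b l ih =>
    intro m
    simp only [List.map_cons, List.foldl_cons, PySem.Str.len_eq]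
    rw [show max (m : Int) (b.toList.length : Nat) = ((max m b.toList.length : Nat) : Int) by push_cast; omega, ih]
    simp only [pvMaxD, List.foldr_cons]
    congr 1
    omega

lemma max_eq_maxD (arr : List String) :
    (PySem.List.max? (arr.map PySem.Str.len) (fun y => y)).getD 0 = (pvMaxD arr : Int) := by
  cases arr with
  | nil => simp [PySem.List.max?, pvMaxD]
  | cons b l =>
    rw [List.map_cons, PySem.List.max?_id_cons]
    rw [PySem.Str.len_eq, foldl_max_len l b.toList.length]
    simp only [Option.getD_some, pvMaxD, List.foldr_cons]

lemma col_cast (arr : List String) (d : Nat) : pvCol arr (d : Int) = pvColN arr d := by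
  unfold pvCol pvColN
  apply List.filterMap_congr
  intro b _
  rw [PySem.Str.len_eq, PySem.List.pyGetD_natCast]
  simp

-- ===== VERDICT (by name: the statement is the Claim_ definition above) =====
theorem getArrByBit_spec : Claim_equal_getArrByBit := by
  intro arr _
  unfold Spec_getArrByBit getArrByBit
  rw [outer arr []]
  simp only [getArrByBit_alt, max_eq_maxD, PySem.List.pyRange_zero_natCast]
  simp only [List.length_nil, Nat.zero_max, List.getD_nil, List.nil_append, List.map_map]
  congr 1
  apply List.map_congr_left
  intro d _
  simp [col_cast]
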